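-- pv_equiv track=rewrite | github.com/heptocat/CryptoGame | lib/cryptofunctions.py | bob
-- ===== SOURCE A (Python) =====
-- def bob(text):
-- 	newstring = ''
-- 	for i in range( len(text) ):
-- 		if text[i].lower() in "bcdfghjklmnpqrstwvxyz":
--
-- 			newstring = newstring + text[i] + 'o' + text[i].lower()
--
-- 		else:
-- 			newstring = newstring + text[i]
--
-- 	return newstring
-- ===== SOURCE B (Python) =====
-- import re
--
-- def bob(text):
--     return re.sub(r'[bcdfghjklmnpqrstwvxyz]',
--                   lambda m: m.group(0) + 'o' + m.group(0).lower(),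
--                   text, flags=re.IGNORECASE)
-- ===== Notes on version B (the rewrite author's own statement) =====
-- stated objective: faster
-- what changed: Replaced the index loop with repeated quadratic string concatenation and a manual membership test by a single re.sub over a consonant character class with a callback appending 'o'+lowercase; the regex engine does one linear pass and builds the result once.
import Mathlib
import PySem

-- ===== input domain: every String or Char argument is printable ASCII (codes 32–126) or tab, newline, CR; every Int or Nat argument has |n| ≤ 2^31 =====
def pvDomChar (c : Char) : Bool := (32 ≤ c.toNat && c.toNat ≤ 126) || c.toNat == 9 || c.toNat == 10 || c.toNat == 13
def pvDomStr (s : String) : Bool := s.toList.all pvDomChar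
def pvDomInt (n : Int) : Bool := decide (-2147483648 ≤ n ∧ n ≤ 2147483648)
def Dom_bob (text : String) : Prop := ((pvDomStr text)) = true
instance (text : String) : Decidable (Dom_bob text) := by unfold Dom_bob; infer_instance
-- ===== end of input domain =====

-- B replaces A's index loop with quadratic string concatenation by a single linear
-- regex-substitution pass (ported as one per-character flatMap, exact for a
-- single-character class pattern); objective: faster (asymptotic, O(n^2) → O(n)).

def pvConsonants : List Char := "bcdfghjklmnpqrstwvxyz".toList

-- ===== PORT A =====
-- for i in range(len(text)): if text[i].lower() in "bcdf…": newstring += text[i]+'o'+lower else newstring += text[i]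
def bob (text : String) : String :=
  let cs := text.toList
  String.mk ((PySem.List.pyRange 0 cs.length 1).foldl
    (fun acc i =>
      let c := PySem.List.pyGetD cs i ' '
      if PySem.Chars.isIn [PySem.Chars.lowerChar c] pvConsonants then
        acc ++ [c, 'o', PySem.Chars.lowerChar c]
      else
        acc ++ [c]) [])

-- ===== PORT B =====
-- re.sub over the single-char class [bcdfghjklmnpqrstwvxyz] with IGNORECASE and
-- callback m.group(0)+'o'+m.group(0).lower(): exactly a per-character substitution,
-- ported as flatMap over the characters (exact: the pattern matches one char at a time).
def bob_alt (text : String) : String :=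
  String.mk (text.toList.flatMap (fun c =>
    let l := PySem.Chars.lowerChar c
    if l ∈ pvConsonants then [c, 'o', l] else [c]))

-- ===== PRECONDITION & SPEC =====
def Spec_bob (text : String) (out : String) : Prop := out = bob_alt text
instance (text : String) (out : String) : Decidable (Spec_bob text out) := by unfold Spec_bob; infer_instance

-- ===== CLAIM (what is proved, stated in full; the proofs are below) =====
def Claim_equal_bob : Prop := ∀ (text : String), Dom_bob text → Spec_bob text (bob text)

-- ===== LEMMAS AND PROOFS =====
theorem pv_isIn_singleton (c : Char) (s : List Char) :
    PySem.Chars.isIn [c] s = decide (c ∈ s) := by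
  by_cases h : c ∈ s
  · simp [h]
    rw [PySem.Chars.isIn_iff_infix]
    exact (List.singleton_infix_iff c s).mpr h
  · simp [h]
    rw [PySem.Chars.isIn_eq_false_iff]
    intro hi
    exact h (hi.mem (by simp))

theorem pv_body_eq (acc : List Char) (c : Char) :
    (if PySem.Chars.isIn [PySem.Chars.lowerChar c] pvConsonants then
        acc ++ [c, 'o', PySem.Chars.lowerChar c]
      else acc ++ [c])
    = acc ++ (if PySem.Chars.lowerChar c ∈ pvConsonants then
        [c, 'o', PySem.Chars.lowerChar c] else [c]) := by
  rw [pv_isIn_singleton]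
  by_cases h : PySem.Chars.lowerChar c ∈ pvConsonants <;> simp [h]

-- ===== VERDICT (by name: the statement is the Claim_ definition above) =====
theorem bob_spec : Claim_equal_bob := by
  intro text _
  unfold Spec_bob bob bob_alt
  simp only []
  congr 1
  have h1 : ∀ (l : List Char) (acc : List Char),
      ((PySem.List.pyRange 0 l.length 1).foldl
        (fun acc i =>
          let c := PySem.List.pyGetD l i ' '
          if PySem.Chars.isIn [PySem.Chars.lowerChar c] pvConsonants then
            acc ++ [c, 'o', PySem.Chars.lowerChar c]
          else acc ++ [c]) acc)
      = acc ++ l.flatMap (fun c =>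
          if PySem.Chars.lowerChar c ∈ pvConsonants then
            [c, 'o', PySem.Chars.lowerChar c] else [c]) := by
    intro l acc
    have := PySem.List.foldl_pyRange_zero_pyGetD l ' '
      (fun acc c =>
        if PySem.Chars.isIn [PySem.Chars.lowerChar c] pvConsonants then
          acc ++ [c, 'o', PySem.Chars.lowerChar c]
        else acc ++ [c]) acc
    simp only [PySem.List.len_eq] at this ⊢
    rw [this]
    have hb : ∀ (acc : List Char) (c : Char),
        (if PySem.Chars.isIn [PySem.Chars.lowerChar c] pvConsonants then
            acc ++ [c, 'o', PySem.Chars.lowerChar c]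
          else acc ++ [c])
        = acc ++ (if PySem.Chars.lowerChar c ∈ pvConsonants then
            [c, 'o', PySem.Chars.lowerChar c] else [c]) := pv_body_eq
    calc l.foldl (fun acc c =>
          if PySem.Chars.isIn [PySem.Chars.lowerChar c] pvConsonants then
            acc ++ [c, 'o', PySem.Chars.lowerChar c]
          else acc ++ [c]) acc
        = l.foldl (fun acc c =>
            acc ++ (if PySem.Chars.lowerChar c ∈ pvConsonants then
              [c, 'o', PySem.Chars.lowerChar c] else [c])) acc := by
          congr 1; funext acc c; exact hb acc c
      _ = _ := PySem.List.foldl_append_eq_flatMap _ _ _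
  simpa using h1 text.toList []
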